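-- pv_equiv track=rewrite | github.com/anditru/hoare-beispiel | rest_blank.py | rest
-- ===== SOURCE A (Python) =====
-- def rest(x, y):
--     # Eingabespezifikation: x >= 0 ^ y > 0
--
--     '''
--
--
--     '''
--
--     #
--     q = 0
--     #
--     r = x
--     # SI:
--     while r >= y:
--         # SI ^ B:
--
--         '''
--         Von Vorbedingung der nächten Anweisung zu I ^ B:
--
--
--
--
--
--
--
--         '''
--
--         #
--         r = r - y
--         #
--         q = q + 1
--         # SI:
--
--     # SI ^ ¬B:
--     return r
-- ===== SOURCE B (Python) =====
-- def rest(x, y):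
--     # Remainder by subtraction, but subtract in doubling chunks:
--     # each outer step removes the largest chunk c = y * 2^k with c <= r.
--     r = x
--     while r >= y:
--         c = y
--         while c * 2 <= r:
--             c *= 2
--         r -= c
--     return r
-- ===== Notes on version B (the rewrite author's own statement) =====
-- stated objective: alternative
-- what changed: Replaces the flat one-y-at-a-time subtraction loop by a two-level scheme: each outer step doubles y into the largest chunk y*2^k <= r and subtracts that whole chunk, so the remainder is reached in O(log(x/y)^2) subtractions instead of O(x/y).
import Mathlib
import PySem

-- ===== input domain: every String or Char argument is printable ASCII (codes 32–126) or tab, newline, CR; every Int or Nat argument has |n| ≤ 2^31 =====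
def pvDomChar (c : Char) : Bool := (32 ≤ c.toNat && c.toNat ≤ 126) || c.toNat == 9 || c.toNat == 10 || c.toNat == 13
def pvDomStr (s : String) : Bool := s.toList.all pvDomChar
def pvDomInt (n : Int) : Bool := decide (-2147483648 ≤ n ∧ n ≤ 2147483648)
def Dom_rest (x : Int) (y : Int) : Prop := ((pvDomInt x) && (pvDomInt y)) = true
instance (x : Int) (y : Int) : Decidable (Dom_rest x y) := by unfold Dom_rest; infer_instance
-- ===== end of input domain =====

-- B subtracts the largest doubling chunk y*2^k each outer step instead of one y at a time (a different, two-level algorithm).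
-- Pre_rest excludes exactly the inputs (y <= 0 and x >= y) on which Python A (and B) never returns (infinite loop).


-- ===== PORT A =====
-- A's while loop, by structural recursion on a fuel bound that is provably enough
-- (when 0 < y the loop runs fewer than (r + 1 - y).toNat times; when the loop
-- condition never ends in Python, y ≤ 0 ∧ r ≥ y, those inputs are outside Pre_rest).
def restLoopA : Nat → Int → Int → Int → Int
  | 0, _, _, r => r
  | fuel + 1, y, q, r => if y ≤ r then restLoopA fuel y (q + 1) (r - y) else r

def rest (x : Int) (y : Int) : Int :=
  restLoopA (x + 1 - y).toNat y 0 x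

-- ===== PORT B =====
-- inner loop of B: double c while c*2 <= r ((r - c).toNat doublings provably suffice)
def doubleChunk : Nat → Int → Int → Int
  | 0, _, c => c
  | fuel + 1, r, c => if c * 2 ≤ r then doubleChunk fuel r (c * 2) else c

-- outer loop of B, fuel as for A's loop
def restAltLoop : Nat → Int → Int → Int
  | 0, _, r => r
  | fuel + 1, y, r =>
    if y ≤ r then restAltLoop fuel y (r - doubleChunk (r - y).toNat r y) else r

def rest_alt (x : Int) (y : Int) : Int :=
  restAltLoop (x + 1 - y).toNat y x

-- ===== PRECONDITION & SPEC =====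
-- Pre_rest holds exactly where Python A returns: otherwise (y ≤ 0 and x ≥ y) its loop never ends.
def Pre_rest (x : Int) (y : Int) : Prop := 0 < y ∨ x < y
instance (x : Int) (y : Int) : Decidable (Pre_rest x y) := by unfold Pre_rest; infer_instance
def pvWitness_rest : Int × Int := (17, 5)

def Spec_rest (x : Int) (y : Int) (out : Int) : Prop := out = rest_alt x y
instance (x : Int) (y : Int) (out : Int) : Decidable (Spec_rest x y out) := by unfold Spec_rest; infer_instance

-- ===== CLAIM (what is proved, stated in full; the proofs are below) =====
def Claim_equal_rest : Prop := ∀ (x : Int) (y : Int), Dom_rest x y → Pre_rest x y → Spec_rest x y (rest x y)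

-- ===== LEMMAS AND PROOFS =====

-- with enough fuel, A's loop returns r for r < y and r % y otherwise
theorem restLoopA_eq (fuel : Nat) (y q r : Int) (hy : 0 < y)
    (hf : (r + 1 - y).toNat ≤ fuel) :
    restLoopA fuel y q r = if r < y then r else r % y := by
  induction fuel generalizing q r with
  | zero =>
    have hr : r < y := by omega
    simp [restLoopA, if_pos hr]
  | succ fuel ih =>
    by_cases hyr : y ≤ r
    · rw [restLoopA, if_pos hyr, ih (q + 1) (r - y) (by omega)]
      have h1 : (r - y) % y = r % y := Int.sub_emod_right r y
      have hm0 : 0 ≤ r % y := Int.emod_nonneg r (by omega)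
      have hmlt : r % y < y := Int.emod_lt_of_pos r hy
      have h3 : r - y < y → (r - y) % y = r - y := fun hlt =>
        Int.emod_eq_of_lt (by omega) hlt
      split_ifs with hlt <;> omega
    · rw [restLoopA, if_neg hyr, if_pos (by omega : r < y)]

-- for any fuel, the chunk stays between its start c and r, and keeps y ∣ c
theorem doubleChunk_bounds (fuel : Nat) (r c y : Int) (hc : 0 < c) (hcr : c ≤ r)
    (hd : y ∣ c) :
    c ≤ doubleChunk fuel r c ∧ doubleChunk fuel r c ≤ r ∧ y ∣ doubleChunk fuel r c := by
  induction fuel generalizing c with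
  | zero => exact ⟨le_refl c, hcr, hd⟩
  | succ fuel ih =>
    by_cases h2 : c * 2 ≤ r
    · have := ih (c * 2) (by omega) (by omega) (Dvd.dvd.mul_right hd 2)
      rw [doubleChunk, if_pos h2]
      exact ⟨by omega, this.2.1, this.2.2⟩
    · rw [doubleChunk, if_neg h2]
      exact ⟨le_refl c, hcr, hd⟩

-- with enough fuel, B's loop returns the same value as A's
theorem restAltLoop_eq (fuel : Nat) (y r : Int) (hy : 0 < y)
    (hf : (r + 1 - y).toNat ≤ fuel) :
    restAltLoop fuel y r = if r < y then r else r % y := by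
  induction fuel generalizing r with
  | zero =>
    have hr : r < y := by omega
    simp [restAltLoop, if_pos hr]
  | succ fuel ih =>
    by_cases hyr : y ≤ r
    · obtain ⟨hcy, hcr, k, hk⟩ :=
        doubleChunk_bounds (r - y).toNat r y y hy hyr (dvd_refl y)
      set c := doubleChunk (r - y).toNat r y with hc
      rw [restAltLoop, if_pos hyr, ih (r - c) (by omega)]
      have h1 : (r - c) % y = r % y := by
        rw [show r - c = r - y * k from by omega, Int.sub_mul_emod_self_left]
      have hm0 : 0 ≤ r % y := Int.emod_nonneg r (by omega)
      have hmlt : r % y < y := Int.emod_lt_of_pos r hy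
      have h3 : r - c < y → (r - c) % y = r - c := fun hlt =>
        Int.emod_eq_of_lt (by omega) hlt
      split_ifs with hlt <;> omega
    · rw [restAltLoop, if_neg hyr, if_pos (by omega : r < y)]

-- ===== VERDICT (by name: the statement is the Claim_ definition above) =====
theorem rest_spec : Claim_equal_rest := by
  intro x y _ hpre
  unfold Spec_rest rest rest_alt
  rcases hpre with hy | hxy
  · rw [restLoopA_eq (x + 1 - y).toNat y 0 x hy (le_refl _),
        restAltLoop_eq (x + 1 - y).toNat y x hy (le_refl _)]
  · have h0 : (x + 1 - y).toNat = 0 ∨ ¬ y ≤ x := by omega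
    rcases h0 with h0 | h0
    · rw [h0]; rfl
    · cases hn : (x + 1 - y).toNat with
      | zero => rfl
      | succ n => rw [restLoopA, if_neg h0, restAltLoop, if_neg h0]
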